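-- pv_equiv track=rewrite | github.com/mariaangelps/cs-archive | CS/cs 100/HW10_MariaPalacios.py | shareOneLetter
-- ===== SOURCE A (Python) =====
-- def shareOneLetter(wordList):
--     wordcount = {}
--     for i in wordList:
--         starting_letter = []
--         for word in wordList:
--             for item in i:
--                 if item in word:
--                     if word not in starting_letter:
--                         starting_letter.append(word)
--                         break
--         if i not in wordcount:
--             wordcount[i] = starting_letter
--     return wordcount
-- ===== SOURCE B (Python) =====
-- def shareOneLetter(wordList):
--     # inverted index: letter -> set of words containing it
--     index = {}
--     for w in wordList:
--         for c in set(w):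
--             index.setdefault(c, set()).add(w)
--     result = {}
--     for w in wordList:
--         if w in result:
--             continue
--         cand = set()
--         for c in set(w):
--             cand |= index[c]
--         seen = set()
--         shared = []
--         for x in wordList:
--             if x in cand and x not in seen:
--                 seen.add(x)
--                 shared.append(x)
--         result[w] = shared
--     return result
-- ===== Notes on version B (the rewrite author's own statement) =====
-- stated objective: faster
-- what changed: Replaces A's per-key full rescan (for every key word, rescan the whole list, per candidate word loop over the key's letters with substring tests and a linear dedup scan of the growing result) by an inverted index built once mapping each letter to the set of words containing it; each distinct key's result is then the union of its letters' index buckets, used to filter the list in order with an O(1) seen-set dedup.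
import Mathlib
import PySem

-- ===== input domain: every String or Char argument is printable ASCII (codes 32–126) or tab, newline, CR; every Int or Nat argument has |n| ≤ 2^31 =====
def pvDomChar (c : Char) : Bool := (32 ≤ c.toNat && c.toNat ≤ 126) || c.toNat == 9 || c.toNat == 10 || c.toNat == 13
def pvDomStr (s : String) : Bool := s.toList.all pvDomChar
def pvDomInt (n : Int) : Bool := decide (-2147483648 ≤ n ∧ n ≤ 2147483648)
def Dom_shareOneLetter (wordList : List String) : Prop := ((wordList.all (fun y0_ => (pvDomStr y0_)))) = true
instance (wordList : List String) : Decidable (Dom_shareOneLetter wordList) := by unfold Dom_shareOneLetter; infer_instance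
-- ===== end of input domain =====

-- B replaces A's per-key full rescan (for each key, scan every word letter by letter with a
-- linear dedup scan) by an inverted index letter → set of words, built once, then an
-- index-union + ordered filter per distinct key.

-- ===== PORT A =====
-- 'for item in i: if item in word: …' — item is a single character, so the Python
-- substring test 'item in word' is exactly character membership in word (exact here).
def shareOneLetterItemLoop (cs : List Char) (startingLetter : List String) (word : String) : List String :=
  match cs with
  | [] => startingLetter
  | c :: rest =>
    if word.toList.contains c then
      if startingLetter.contains word then shareOneLetterItemLoop rest startingLetter word
      else startingLetter ++ [word]            -- append, then break
    else shareOneLetterItemLoop rest startingLetter word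

def shareOneLetter (wordList : List String) : List (String × List String) :=
  (wordList.foldl (fun wordcount i =>
    let startingLetter :=
      wordList.foldl (fun sl word => shareOneLetterItemLoop i.toList sl word) []
    if wordcount.contains i then wordcount else wordcount.insert i startingLetter)
    (PySem.Dict.mk [])).items

-- ===== PORT B =====
-- index.setdefault(c, set()).add(w): fetch the stored set (or the fresh empty one), add w,
-- store it back under c — ported as getD-then-insert (insert keeps an existing key's position,
-- and only getD is ever used on index, so this is exact).
def shareOneLetterIndex (wordList : List String) : PySem.Dict Char (PySem.Set String) :=
  wordList.foldl (fun index w =>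
    (PySem.Set.ofList w.toList).foldl (fun index c =>
      index.insert c (PySem.Set.add (index.getD c PySem.Set.empty) w)) index)
    (PySem.Dict.mk [])

def shareOneLetter_alt (wordList : List String) : List (String × List String) :=
  let index := shareOneLetterIndex wordList
  (wordList.foldl (fun result w =>
    if result.contains w then result    -- 'if w in result: continue'
    else
      -- cand |= index[c]: every c of a word of wordList is a key of index, so the
      -- KeyError-free lookup index[c] is exactly getD with any default (empty here).
      let cand := (PySem.Set.ofList w.toList).foldl
        (fun cand c => PySem.Set.union cand (index.getD c PySem.Set.empty)) PySem.Set.empty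
      let shared := (wordList.foldl (fun st x =>
        if PySem.Set.contains cand x && !PySem.Set.contains st.1 x
        then (PySem.Set.add st.1 x, st.2 ++ [x]) else st)
        ((PySem.Set.empty : PySem.Set String), ([] : List String))).2
      result.insert w shared)
    (PySem.Dict.mk [])).items

-- ===== PRECONDITION & SPEC =====
def Spec_shareOneLetter (wordList : List String) (out : List (String × List String)) : Prop := out = shareOneLetter_alt wordList
instance (wordList : List String) (out : List (String × List String)) : Decidable (Spec_shareOneLetter wordList out) := by unfold Spec_shareOneLetter; infer_instance

-- ===== CLAIM (what is proved, stated in full; the proofs are below) =====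
def Claim_equal_shareOneLetter : Prop := ∀ (wordList : List String), Dom_shareOneLetter wordList → Spec_shareOneLetter wordList (shareOneLetter wordList)

-- ===== LEMMAS AND PROOFS =====

-- the inner character loop appends word iff some letter of i occurs in word and it is new
theorem itemLoop_eq (cs : List Char) (sl : List String) (word : String) :
    shareOneLetterItemLoop cs sl word =
      if cs.any (fun c => word.toList.contains c) && !sl.contains word
      then sl ++ [word] else sl := by
  induction cs with
  | nil => simp [shareOneLetterItemLoop]
  | cons c rest ih =>
    simp only [shareOneLetterItemLoop, List.any_cons]
    by_cases h : word.toList.contains c = true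
    · have h' : c ∈ word.toList := by simpa using h
      by_cases hm : sl.contains word = true
      · have hm' : word ∈ sl := by simpa using hm
        simp [h', hm', ih]
      · have hm' : word ∉ sl := by simpa using hm
        simp [h', hm']
    · have h' : c ∉ word.toList := by simpa using h
      simp [h', ih]

-- the accumulate-if-new loop = ordered dedup then filter
theorem foldAddIf_eq (p : String → Bool) (xs : List String) (sl : List String) :
    xs.foldl (fun sl w => if p w && !sl.contains w then sl ++ [w] else sl) sl
      = sl ++ (PySem.List.dedup xs).filter (fun w => p w && !sl.contains w) := by
  induction xs generalizing sl with
  | nil => simp [PySem.List.dedup]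
  | cons x xs ih =>
    simp only [List.foldl_cons, PySem.List.dedup_eq_ofList, PySem.Set.ofList_cons] at *
    by_cases hstep : (p x && !sl.contains x) = true
    · rw [if_pos hstep, ih, List.filter_cons, if_pos hstep]
      have heq : (PySem.Set.ofList xs).filter (fun w => p w && !(sl ++ [x]).contains w)
          = ((PySem.Set.ofList xs).discard x).filter (fun w => p w && !sl.contains w) := by
        simp only [PySem.Set.discard, List.filter_filter]
        apply List.filter_congr
        intro w _
        by_cases hw : w = x
        · subst hw; simp
        · simp [hw]
      rw [heq]; simp
    · rw [if_neg hstep, ih, List.filter_cons, if_neg hstep]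
      congr 1
      simp only [PySem.Set.discard, List.filter_filter]
      apply List.filter_congr
      intro w _
      by_cases hw : w = x
      · subst hw; simp only [hstep]; simp
      · simp [hw]

-- B's seen-set filter loop is the same accumulate-if-new loop, state split into (seen, out)
theorem filterSeen_eq (p : String → Bool) (xs : List String)
    (seen : PySem.Set String) (out : List String)
    (h : ∀ y, PySem.Set.contains seen y = out.contains y) :
    (xs.foldl (fun st x =>
        if p x && !PySem.Set.contains st.1 x then (PySem.Set.add st.1 x, st.2 ++ [x]) else st)
      (seen, out)).2
      = xs.foldl (fun sl x => if p x && !sl.contains x then sl ++ [x] else sl) out := by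
  induction xs generalizing seen out with
  | nil => rfl
  | cons x xs ih =>
    simp only [List.foldl_cons, h x]
    by_cases hc : (p x && !out.contains x) = true
    · rw [if_pos hc, if_pos hc]
      apply ih
      intro y
      rw [Bool.eq_iff_iff]
      constructor
      · intro hy
        have := (PySem.Set.contains_iff _ _).1 hy
        rcases (PySem.Set.mem_add _ _ _).1 this with hy' | hy'
        · have := (h y) ▸ (PySem.Set.contains_iff _ _).2 hy'
          simp only [List.contains_eq_mem] at this ⊢
          simp only [decide_eq_true_eq] at this
          simp [this]
        · subst hy'; simp
      · intro hy
        have hy' : y ∈ out ++ [x] := by simpa using hy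
        apply (PySem.Set.contains_iff _ _).2
        apply (PySem.Set.mem_add _ _ _).2
        rcases List.mem_append.1 hy' with h1 | h1
        · left
          exact (PySem.Set.contains_iff _ _).1 ((h y) ▸ (by simpa using h1))
        · right; simpa using h1
    · rw [if_neg hc, if_neg hc]
      exact ih seen out h

-- membership in the inverted index after indexing the letters of one word
theorem innerIdx_mem (cs : List Char) (d : PySem.Dict Char (PySem.Set String))
    (w x : String) (c' : Char) :
    x ∈ (cs.foldl (fun idx c =>
          idx.insert c (PySem.Set.add (idx.getD c PySem.Set.empty) w)) d).getD c' PySem.Set.empty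
      ↔ x ∈ d.getD c' PySem.Set.empty ∨ (c' ∈ cs ∧ x = w) := by
  induction cs generalizing d with
  | nil => simp
  | cons c rest ih =>
    simp only [List.foldl_cons, ih, PySem.Dict.getD_insert, List.mem_cons]
    split_ifs with hcc
    · subst hcc
      simp only [PySem.Set.mem_add]
      tauto
    · tauto

-- membership in the full inverted index = 'some word of the list contains the letter'
theorem index_mem (ws : List String) (d : PySem.Dict Char (PySem.Set String)) (c' : Char) (x : String) :
    x ∈ (ws.foldl (fun index w =>
          (PySem.Set.ofList w.toList).foldl (fun index c =>
            index.insert c (PySem.Set.add (index.getD c PySem.Set.empty) w)) index) d).getD c' PySem.Set.empty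
      ↔ x ∈ d.getD c' PySem.Set.empty ∨ (x ∈ ws ∧ c' ∈ x.toList) := by
  induction ws generalizing d with
  | nil => simp
  | cons w ws ih =>
    simp only [List.foldl_cons, ih, innerIdx_mem, PySem.Set.mem_ofList, List.mem_cons]
    constructor
    · rintro (⟨h1 | ⟨h1, rfl⟩⟩ | ⟨h1, h2⟩)
      · exact Or.inl h1
      · exact Or.inr ⟨Or.inl rfl, h1⟩
      · exact Or.inr ⟨Or.inr h1, h2⟩
    · rintro (h1 | ⟨rfl | h1, h2⟩)
      · exact Or.inl (Or.inl h1)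
      · exact Or.inl (Or.inr ⟨h2, rfl⟩)
      · exact Or.inr ⟨h1, h2⟩

-- membership in the union of index buckets over a list of letters
theorem candFold_mem (cs : List Char) (idx : PySem.Dict Char (PySem.Set String))
    (s0 : PySem.Set String) (x : String) :
    x ∈ cs.foldl (fun cand c => PySem.Set.union cand (idx.getD c PySem.Set.empty)) s0
      ↔ x ∈ s0 ∨ ∃ c ∈ cs, x ∈ idx.getD c PySem.Set.empty := by
  induction cs generalizing s0 with
  | nil => simp
  | cons c rest ih =>
    simp only [List.foldl_cons, ih, PySem.Set.mem_union, List.mem_cons]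
    constructor
    · rintro ((h1 | h1) | ⟨c', h1, h2⟩)
      · exact Or.inl h1
      · exact Or.inr ⟨c, Or.inl rfl, h1⟩
      · exact Or.inr ⟨c', Or.inr h1, h2⟩
    · rintro (h1 | ⟨c', h1 | h1, h2⟩)
      · exact Or.inl (Or.inl h1)
      · exact Or.inl (Or.inr (h1 ▸ h2))
      · exact Or.inr ⟨c', h1, h2⟩

-- the candidate test of B = the shared-letter test of A, for words of the list
theorem cand_contains_eq (wordList : List String) (i x : String) (hx : x ∈ wordList) :
    PySem.Set.contains
      ((PySem.Set.ofList i.toList).foldl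
        (fun cand c => PySem.Set.union cand ((shareOneLetterIndex wordList).getD c PySem.Set.empty))
        PySem.Set.empty) x
      = (i.toList.any fun c => x.toList.contains c) := by
  rw [Bool.eq_iff_iff]
  rw [PySem.Set.contains_iff, candFold_mem]
  unfold shareOneLetterIndex
  simp only [index_mem, PySem.Set.mem_ofList]
  constructor
  · rintro (h | ⟨c, hc, h1 | ⟨_, h2⟩⟩)
    · simp [PySem.Set.empty] at h
    · simp only [PySem.Dict.getD, PySem.Dict.get?] at h1
      simp [PySem.Set.empty] at h1
    · simp only [List.any_eq_true, List.contains_iff_mem]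
      exact ⟨c, hc, h2⟩
  · intro h
    simp only [List.any_eq_true, List.contains_iff_mem] at h
    obtain ⟨c, hc, h2⟩ := h
    exact Or.inr ⟨c, hc, Or.inr ⟨hx, h2⟩⟩

-- ===== VERDICT (by name: the statement is the Claim_ definition above) =====
theorem shareOneLetter_spec : Claim_equal_shareOneLetter := by
  intro wordList _
  show shareOneLetter wordList = shareOneLetter_alt wordList
  unfold shareOneLetter shareOneLetter_alt
  simp only [itemLoop_eq]
  congr 1
  apply PySem.List.foldl_congr_mem
  intro wc i _
  congr 1
  rw [filterSeen_eq _ _ _ _ (fun y => by simp [PySem.Set.empty, PySem.Set.contains])]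
  rw [foldAddIf_eq, foldAddIf_eq]
  simp only [List.nil_append]
  congr 1
  apply List.filter_congr
  intro x hxd
  have hx : x ∈ wordList := by simpa using hxd
  rw [cand_contains_eq wordList i x hx]
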